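-- pv_equiv track=rewrite | github.com/KennyTC/Algorithm | String/NextClosetTime.py | GenerateNumber
-- ===== SOURCE A (Python) =====
-- def GenerateNumber(num):
--     hour = []
--     minute = []
--     for i in num:
--         for j in num:
--             number = str(i + j)
--             if int(number) < 60:
--                 minute.append(number)
--             if int(number) < 24:
--                 hour.append(number)
--     return hour, minute
-- ===== SOURCE B (Python) =====
-- def GenerateNumber(num):
--     # Memoize the row of valid sums per distinct outer value, accumulate the
--     # numeric sums in one stream, then render both answers from that stream:
--     # minute is every sum stringified, hour the sub-filter of sums < 24.
--     rowcache = {}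
--     sums = []
--     for i in num:
--         if i not in rowcache:
--             rowcache[i] = [i + j for j in num if i + j < 60]
--         sums += rowcache[i]
--     hour = [str(v) for v in sums if v < 24]
--     minute = [str(v) for v in sums]
--     return hour, minute
-- ===== Notes on version B (the rewrite author's own statement) =====
-- stated objective: alternative
-- what changed: A fills two independent accumulators inside one nested loop, re-parsing each str(i+j) with int() for both bounds; B memoizes the row of valid sums per distinct outer value in a dict, concatenates rows into one numeric stream, and renders both lists from it (minute = every sum stringified, hour = the sub-filter of sums < 24), so duplicate outer values never recompute their inner pass.
import Mathlib
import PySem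

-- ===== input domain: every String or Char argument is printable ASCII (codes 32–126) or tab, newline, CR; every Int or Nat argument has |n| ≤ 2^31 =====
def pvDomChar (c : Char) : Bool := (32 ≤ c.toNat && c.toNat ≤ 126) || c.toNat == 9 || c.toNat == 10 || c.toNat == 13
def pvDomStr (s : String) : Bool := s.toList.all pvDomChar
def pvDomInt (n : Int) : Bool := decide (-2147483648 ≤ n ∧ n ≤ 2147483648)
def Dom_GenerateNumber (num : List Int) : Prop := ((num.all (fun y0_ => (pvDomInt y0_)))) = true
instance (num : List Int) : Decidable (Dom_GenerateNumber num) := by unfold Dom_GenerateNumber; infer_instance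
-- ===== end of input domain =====

-- B replaces A's nested loop with two accumulators (and its int(str(i+j)) re-parses)
-- by a dict memoizing the row of valid sums per distinct outer value, one numeric
-- stream of sums, and a final rendering stage deriving hour as the sub-filter of
-- that stream; objective: alternative decomposition, same worst-case cost.

-- ===== PORT A =====
def GenerateNumber (num : List Int) : List String × List String :=
  num.foldl (fun acc i =>
    num.foldl (fun acc j =>
      let number := PySem.Int.toStr (i + j)
      -- int(number) with number = str(i + j): int ∘ str is the identity on Python
      -- ints, so the two `int(number) < _` tests are ported as tests on i + j.
      let acc := if i + j < 60 then (acc.1, acc.2 ++ [number]) else acc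
      if i + j < 24 then (acc.1 ++ [number], acc.2) else acc) acc) ([], [])

-- ===== PORT B =====
-- the comprehension `[i + j for j in num if i + j < 60]`
def pvRowB (i : Int) (js : List Int) : List Int :=
  js.flatMap (fun j => if i + j < 60 then [i + j] else [])

-- one iteration of B's loop: fill the cache on a miss, then extend sums with the row
def pvStepB (num : List Int) (st : PySem.Dict Int (List Int) × List Int) (i : Int) :
    PySem.Dict Int (List Int) × List Int :=
  let cache := if st.1.contains i then st.1 else st.1.insert i (pvRowB i num)
  (cache, st.2 ++ cache.getD i [])

-- the two final comprehensions rendering hour and minute from the sums stream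
def pvRender (sums : List Int) : List String × List String :=
  (sums.flatMap (fun v => if v < 24 then [PySem.Int.toStr v] else []),
   sums.map (fun v => PySem.Int.toStr v))

def GenerateNumber_alt (num : List Int) : List String × List String :=
  pvRender (num.foldl (pvStepB num) (PySem.Dict.mk [], [])).2

-- ===== PRECONDITION & SPEC =====
def Spec_GenerateNumber (num : List Int) (out : List String × List String) : Prop := out = GenerateNumber_alt num
instance (num : List Int) (out : List String × List String) : Decidable (Spec_GenerateNumber num out) := by unfold Spec_GenerateNumber; infer_instance

-- ===== CLAIM (what is proved, stated in full; the proofs are below) =====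
def Claim_equal_GenerateNumber : Prop := ∀ (num : List Int), Dom_GenerateNumber num → Spec_GenerateNumber num (GenerateNumber num)

-- ===== LEMMAS AND PROOFS =====

-- strings one outer element i contributes to A's hour / minute accumulators
def pvHourRow (i : Int) (js : List Int) : List String :=
  js.flatMap (fun j => if i + j < 24 then [PySem.Int.toStr (i + j)] else [])

def pvMinRow (i : Int) (js : List Int) : List String :=
  js.flatMap (fun j => if i + j < 60 then [PySem.Int.toStr (i + j)] else [])

lemma pvInnerA (i : Int) (js : List Int) (acc : List String × List String) :
    js.foldl (fun acc j =>
      let number := PySem.Int.toStr (i + j)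
      let acc := if i + j < 60 then (acc.1, acc.2 ++ [number]) else acc
      if i + j < 24 then (acc.1 ++ [number], acc.2) else acc) acc
      = (acc.1 ++ pvHourRow i js, acc.2 ++ pvMinRow i js) := by
  induction js generalizing acc with
  | nil => simp [pvHourRow, pvMinRow]
  | cons j js ih =>
    simp only [List.foldl_cons, ih, pvHourRow, pvMinRow, List.flatMap_cons]
    by_cases h24 : i + j < 24
    · have h60 : i + j < 60 := by omega
      simp [h24, h60, List.append_assoc]
    · by_cases h60 : i + j < 60 <;> simp [h24, h60, List.append_assoc]

lemma pvOuterA (num js : List Int) (acc : List String × List String) :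
    js.foldl (fun acc i =>
      num.foldl (fun acc j =>
        let number := PySem.Int.toStr (i + j)
        let acc := if i + j < 60 then (acc.1, acc.2 ++ [number]) else acc
        if i + j < 24 then (acc.1 ++ [number], acc.2) else acc) acc) acc
      = (acc.1 ++ js.flatMap (fun i => pvHourRow i num),
         acc.2 ++ js.flatMap (fun i => pvMinRow i num)) := by
  induction js generalizing acc with
  | nil => simp
  | cons i js ih =>
    rw [List.foldl_cons, pvInnerA, ih]
    simp [List.append_assoc]

-- invariant: every row cached in B's dict is the true row of its key
def pvGood (num : List Int) (d : PySem.Dict Int (List Int)) : Prop :=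
  ∀ i r, d.get? i = some r → r = pvRowB i num

lemma pvOuterB (num js : List Int) (d : PySem.Dict Int (List Int)) (acc : List Int)
    (hd : pvGood num d) :
    (js.foldl (pvStepB num) (d, acc)).2 = acc ++ js.flatMap (fun i => pvRowB i num) := by
  induction js generalizing d acc with
  | nil => simp
  | cons i js ih =>
    rw [List.foldl_cons, List.flatMap_cons]
    by_cases hc : d.contains i = true
    · have hv : ∃ r, d.get? i = some r := by
        rcases h : d.get? i with _ | r
        · rw [PySem.Dict.get?_eq_none_iff_contains] at h
          simp [hc] at h
        · exact ⟨r, rfl⟩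
      rcases hv with ⟨r, hr⟩
      have hget : d.getD i [] = pvRowB i num := by
        rw [PySem.Dict.getD_of_get?_eq_some d [] hr, hd i r hr]
      have hstep : pvStepB num (d, acc) i = (d, acc ++ pvRowB i num) := by
        simp [pvStepB, hc, hget]
      rw [hstep, ih d (acc ++ pvRowB i num) hd, List.append_assoc]
    · have hgood : pvGood num (d.insert i (pvRowB i num)) := by
        intro k r hk
        by_cases hki : k = i
        · subst hki
          rw [PySem.Dict.get?_insert_self d k (pvRowB k num)] at hk
          exact (Option.some_inj.mp hk).symm
        · rw [PySem.Dict.get?_insert_of_ne d (pvRowB i num) hki] at hk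
          exact hd k r hk
      have hstep : pvStepB num (d, acc) i
          = (d.insert i (pvRowB i num), acc ++ pvRowB i num) := by
        simp [pvStepB, hc, PySem.Dict.getD_insert_self]
      rw [hstep, ih _ (acc ++ pvRowB i num) hgood, List.append_assoc]

lemma pvRowB_map (i : Int) (js : List Int) :
    (pvRowB i js).map (fun v => PySem.Int.toStr v) = pvMinRow i js := by
  induction js with
  | nil => simp [pvRowB, pvMinRow]
  | cons j js ih =>
    simp only [pvRowB, pvMinRow, List.flatMap_cons, List.map_append] at *
    by_cases h : i + j < 60 <;> simp [h, ih]

lemma pvRowB_hour (i : Int) (js : List Int) :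
    (pvRowB i js).flatMap (fun v => if v < 24 then [PySem.Int.toStr v] else [])
      = pvHourRow i js := by
  induction js with
  | nil => simp [pvRowB, pvHourRow]
  | cons j js ih =>
    simp only [pvRowB, pvHourRow, List.flatMap_cons, List.flatMap_append] at *
    by_cases h24 : i + j < 24
    · have h60 : i + j < 60 := by omega
      simp [h24, h60, ih]
    · by_cases h60 : i + j < 60 <;> simp [h24, h60, ih]

lemma pvRender_flatMap (num js : List Int) :
    pvRender (js.flatMap (fun i => pvRowB i num))
      = (js.flatMap (fun i => pvHourRow i num), js.flatMap (fun i => pvMinRow i num)) := by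
  induction js with
  | nil => simp [pvRender]
  | cons i js ih =>
    simp only [pvRender, List.flatMap_cons, List.flatMap_append, List.map_append] at *
    rw [pvRowB_map, pvRowB_hour]
    rw [Prod.mk.injEq] at ih ⊢
    exact ⟨by rw [ih.1], by rw [ih.2]⟩

-- ===== VERDICT (by name: the statement is the Claim_ definition above) =====
theorem GenerateNumber_spec : Claim_equal_GenerateNumber := by
  intro num _
  show GenerateNumber num = GenerateNumber_alt num
  unfold GenerateNumber GenerateNumber_alt
  rw [pvOuterA, pvOuterB num num (PySem.Dict.mk []) []
        (by intro i r h; simp [PySem.Dict.get?] at h)]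
  simp only [List.nil_append]
  rw [pvRender_flatMap]
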